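-- pv_equiv track=rewrite | github.com/GouthamJosh/YT_DWD | bot.py | parse_index_selection
-- ===== SOURCE A (Python) =====
-- def parse_index_selection(text: str, total: int) -> list[int] | None:
--     """
--     Parse user selection like '1,3,5' or '1-5' or '1-3,7,10-12'
--     Returns 0-based indices or None if invalid.
--     """
--     indices = set()
--     text = text.strip()
--     parts = text.split(",")
--     try:
--         for part in parts:
--             part = part.strip()
--             if "-" in part:
--                 a, b = part.split("-", 1)
--                 a, b = int(a.strip()), int(b.strip())
--                 if a < 1 or b > total or a > b:
--                     return None
--                 indices.update(range(a - 1, b))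
--             else:
--                 n = int(part)
--                 if n < 1 or n > total:
--                     return None
--                 indices.add(n - 1)
--         return sorted(indices)
--     except:
--         return None
-- ===== SOURCE B (Python) =====
-- def parse_index_selection(text: str, total: int) -> list[int] | None:
--     """
--     Parse user selection like '1,3,5' or '1-5' or '1-3,7,10-12'
--     Returns 0-based indices or None if invalid.
--     Interval-merge strategy: collect validated (lo, hi) 0-based intervals,
--     sort them by start, then emit each interval's still-uncovered part in
--     one sweep -- no set, no final sort of individual indices.
--     """
--     intervals = []
--     try:
--         for part in text.strip().split(","):
--             part = part.strip()
--             if "-" in part: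
--                 a, b = part.split("-", 1)
--                 a, b = int(a.strip()), int(b.strip())
--             else:
--                 a = b = int(part)
--             if a < 1 or b > total or a > b:
--                 return None
--             intervals.append((a - 1, b - 1))
--     except:
--         return None
--     intervals.sort(key=lambda iv: iv[0])
--     result = []
--     end = -1  # largest index emitted so far
--     for lo, hi in intervals:
--         result.extend(range(max(lo, end + 1), hi + 1))
--         if end < hi:
--             end = hi
--     return result
-- ===== Notes on version B (the rewrite author's own statement) =====
-- stated objective: alternative
-- what changed: B replaces A's element-level set (update/add per index plus a final sort of all indices) by collecting validated (lo,hi) intervals, sorting the intervals by start, and emitting the merged union in one linear sweep, so no per-element set membership work and no final sort of individual indices.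
import Mathlib
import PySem

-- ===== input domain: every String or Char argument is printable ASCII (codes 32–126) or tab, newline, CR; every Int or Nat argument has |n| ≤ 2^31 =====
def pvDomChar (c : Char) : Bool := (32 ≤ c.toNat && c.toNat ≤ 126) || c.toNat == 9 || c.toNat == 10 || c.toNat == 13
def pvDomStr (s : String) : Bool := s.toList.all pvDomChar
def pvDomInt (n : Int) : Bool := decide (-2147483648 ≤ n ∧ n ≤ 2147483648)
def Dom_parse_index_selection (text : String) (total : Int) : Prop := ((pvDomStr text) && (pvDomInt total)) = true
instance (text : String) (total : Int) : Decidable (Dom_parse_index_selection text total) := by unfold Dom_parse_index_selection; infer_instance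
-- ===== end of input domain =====

-- ===== PORT A =====
-- B re-implements A by interval collection + merge instead of an element set; return values proved equal.
-- loop body of A: per comma-part validation, accumulating selected 0-based indices in a set
def pvA_loop (total : Int) : List String → PySem.Set Int → Option (PySem.Set Int)
  | [], indices => some indices
  | part :: rest, indices =>
    let p := PySem.Str.strip part
    if PySem.Str.isIn "-" p then
      match PySem.Str.splitMax? p "-" 1 with
      | some [sa, sb] =>
        match PySem.Int.ofStr? (PySem.Str.strip sa), PySem.Int.ofStr? (PySem.Str.strip sb) with
        | some a, some b =>
          if a < 1 ∨ b > total ∨ a > b then none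
          else pvA_loop total rest (PySem.Set.update indices (PySem.List.pyRange (a - 1) b))
        | _, _ => none
      | _ => none  -- unreachable: split of a string containing "-" with maxsplit 1 yields two pieces
    else
      match PySem.Int.ofStr? p with
      | some n =>
        if n < 1 ∨ n > total then none
        else pvA_loop total rest (PySem.Set.add indices (n - 1))
      | none => none

def parse_index_selection (text : String) (total : Int) : Option (List Int) :=
  -- sep "," ≠ "": split? is some
  (pvA_loop total ((PySem.Str.split? (PySem.Str.strip text) ",").getD []) PySem.Set.empty).map (fun indices => PySem.List.sorted indices (fun x => x))

-- ===== PORT B =====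
-- loop body of B: identical per-part validation, accumulating validated 0-based intervals
def pvB_collect (total : Int) : List String → List (Int × Int) → Option (List (Int × Int))
  | [], intervals => some intervals
  | part :: rest, intervals =>
    let p := PySem.Str.strip part
    let ab? : Option (Int × Int) :=
      if PySem.Str.isIn "-" p then
        match PySem.Str.splitMax? p "-" 1 with
        | some [sa, sb] =>
          match PySem.Int.ofStr? (PySem.Str.strip sa), PySem.Int.ofStr? (PySem.Str.strip sb) with
          | some a, some b => some (a, b)
          | _, _ => none
        | _ => none
      else (PySem.Int.ofStr? p).map (fun n => (n, n))
    match ab? with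
    | none => none
    | some (a, b) =>
      if a < 1 ∨ b > total ∨ a > b then none
      else pvB_collect total rest (intervals ++ [(a - 1, b - 1)])

-- the merge sweep: state = (result, largest index emitted so far)
def pvB_step (st : List Int × Int) (iv : Int × Int) : List Int × Int :=
  (st.1 ++ PySem.List.pyRange (max iv.1 (st.2 + 1)) (iv.2 + 1),
   if st.2 < iv.2 then iv.2 else st.2)

def parse_index_selection_alt (text : String) (total : Int) : Option (List Int) :=
  (pvB_collect total ((PySem.Str.split? (PySem.Str.strip text) ",").getD []) []).map (fun intervals =>
    ((PySem.List.sorted intervals (fun iv => iv.1)).foldl pvB_step ([], -1)).1)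

-- ===== PRECONDITION & SPEC =====
def Spec_parse_index_selection (text : String) (total : Int) (out : Option (List Int)) : Prop := out = parse_index_selection_alt text total
instance (text : String) (total : Int) (out : Option (List Int)) : Decidable (Spec_parse_index_selection text total out) := by unfold Spec_parse_index_selection; infer_instance

-- ===== CLAIM (what is proved, stated in full; the proofs are below) =====
def Claim_equal_parse_index_selection : Prop := ∀ (text : String) (total : Int), Dom_parse_index_selection text total → Spec_parse_index_selection text total (parse_index_selection text total)

-- ===== LEMMAS AND PROOFS =====

-- the invariant tying A's set of indices to B's interval list
def pvInv (idx : PySem.Set Int) (acc : List (Int × Int)) : Prop :=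
  idx.Nodup ∧ (∀ x : Int, x ∈ idx ↔ ∃ iv ∈ acc, iv.1 ≤ x ∧ x ≤ iv.2) ∧
  (∀ iv ∈ acc, 0 ≤ iv.1 ∧ iv.1 ≤ iv.2)

lemma pvInv_step_range (idx : PySem.Set Int) (acc : List (Int × Int)) (a b : Int)
    (h : pvInv idx acc) (h1 : 1 ≤ a) (h3 : a ≤ b) :
    pvInv (PySem.Set.update idx (PySem.List.pyRange (a - 1) b)) (acc ++ [(a - 1, b - 1)]) := by
  obtain ⟨hn, hm, hv⟩ := h
  refine ⟨PySem.Set.nodup_update _ _ hn, ?_, ?_⟩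
  · intro x
    rw [PySem.Set.mem_update, hm]
    simp only [List.mem_append, List.mem_singleton, PySem.List.mem_pyRange_one]
    constructor
    · rintro (⟨iv, hiv, hx⟩ | hx)
      · exact ⟨iv, Or.inl hiv, hx⟩
      · exact ⟨(a - 1, b - 1), Or.inr rfl, by constructor <;> omega⟩
    · rintro ⟨iv, hiv | hiv, hx⟩
      · exact Or.inl ⟨iv, hiv, hx⟩
      · subst hiv; right; simp at hx ⊢; omega
  · intro iv hiv
    rcases List.mem_append.mp hiv with h' | h'
    · exact hv iv h'
    · simp at h'; subst h'; constructor <;> simp <;> omega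

lemma pvInv_step_single (idx : PySem.Set Int) (acc : List (Int × Int)) (n : Int)
    (h : pvInv idx acc) (h1 : 1 ≤ n) :
    pvInv (PySem.Set.add idx (n - 1)) (acc ++ [(n - 1, n - 1)]) := by
  obtain ⟨hn, hm, hv⟩ := h
  refine ⟨PySem.Set.nodup_add _ _ hn, ?_, ?_⟩
  · intro x
    rw [PySem.Set.mem_add, hm]
    simp only [List.mem_append, List.mem_singleton]
    constructor
    · rintro (⟨iv, hiv, hx⟩ | hx)
      · exact ⟨iv, Or.inl hiv, hx⟩
      · exact ⟨(n - 1, n - 1), Or.inr rfl, by subst hx; constructor <;> omega⟩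
    · rintro ⟨iv, hiv | hiv, hx⟩
      · exact Or.inl ⟨iv, hiv, hx⟩
      · subst hiv; right; simp at hx; omega
  · intro iv hiv
    rcases List.mem_append.mp hiv with h' | h'
    · exact hv iv h'
    · simp at h'; subst h'; constructor <;> simp <;> omega

-- the two loops stay in lock step: both fail, or both succeed with related states
lemma pv_sync (total : Int) (parts : List String) :
    ∀ (idx : PySem.Set Int) (acc : List (Int × Int)), pvInv idx acc →
    (pvA_loop total parts idx = none ∧ pvB_collect total parts acc = none) ∨
    (∃ idx' acc', pvA_loop total parts idx = some idx' ∧ pvB_collect total parts acc = some acc' ∧ pvInv idx' acc') := by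
  induction parts with
  | nil => intro idx acc h; exact Or.inr ⟨idx, acc, rfl, rfl, h⟩
  | cons part rest ih =>
    intro idx acc h
    simp only [pvA_loop, pvB_collect]
    by_cases hdash : PySem.Str.isIn "-" (PySem.Str.strip part) = true
    · rw [if_pos hdash, if_pos hdash]
      generalize PySem.Str.splitMax? (PySem.Str.strip part) "-" 1 = sp
      match sp with
      | none => exact Or.inl ⟨rfl, rfl⟩
      | some [] => exact Or.inl ⟨rfl, rfl⟩
      | some [sa] => exact Or.inl ⟨rfl, rfl⟩
      | some (sa :: sb :: c :: t) => exact Or.inl ⟨rfl, rfl⟩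
      | some [sa, sb] =>
        dsimp only
        generalize PySem.Int.ofStr? (PySem.Str.strip sa) = oa
        generalize PySem.Int.ofStr? (PySem.Str.strip sb) = ob
        match oa, ob with
        | none, none => exact Or.inl ⟨rfl, rfl⟩
        | none, some b => exact Or.inl ⟨rfl, rfl⟩
        | some a, none => exact Or.inl ⟨rfl, rfl⟩
        | some a, some b =>
          dsimp only
          by_cases hc : a < 1 ∨ b > total ∨ a > b
          · rw [if_pos hc, if_pos hc]; exact Or.inl ⟨rfl, rfl⟩
          · rw [if_neg hc, if_neg hc]
            exact ih _ _ (pvInv_step_range idx acc a b h (by omega) (by omega))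
    · rw [if_neg hdash, if_neg hdash]
      generalize PySem.Int.ofStr? (PySem.Str.strip part) = on
      match on with
      | none => exact Or.inl ⟨rfl, rfl⟩
      | some n =>
        dsimp only
        by_cases hc : n < 1 ∨ n > total
        · have hc' : n < 1 ∨ n > total ∨ n > n := by omega
          rw [if_pos hc]
          simp only [Option.map_some]
          rw [if_pos hc']
          exact Or.inl ⟨trivial, rfl⟩
        · have hc' : ¬(n < 1 ∨ n > total ∨ n > n) := by omega
          rw [if_neg hc]
          simp only [Option.map_some]
          rw [if_neg hc']
          exact ih _ _ (pvInv_step_single idx acc n h (by omega))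

-- one sweep step of B, stated for a whole sorted interval list with a generalized state
lemma pv_emit (ivs : List (Int × Int)) :
    ∀ (res : List Int) (e : Int),
    res.Pairwise (· < ·) → (∀ x ∈ res, x ≤ e) →
    ivs.Pairwise (fun p q => p.1 ≤ q.1) → (∀ iv ∈ ivs, iv.1 ≤ iv.2) →
    (∀ iv ∈ ivs, ∀ x : Int, iv.1 ≤ x → x ≤ e → x ∈ res) →
    (ivs.foldl pvB_step (res, e)).1.Pairwise (· < ·) ∧
    (∀ x : Int, x ∈ (ivs.foldl pvB_step (res, e)).1 ↔ x ∈ res ∨ ∃ iv ∈ ivs, iv.1 ≤ x ∧ x ≤ iv.2) := by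
  induction ivs with
  | nil => intro res e h1 h2 _ _ _; simp [h1]
  | cons iv rest ih =>
    intro res e h1 h2 hsorted hle hcov
    obtain ⟨lo, hi⟩ := iv
    have hlohi : lo ≤ hi := hle (lo, hi) (by simp)
    simp only [List.foldl_cons]
    have hstep : pvB_step (res, e) (lo, hi) = (res ++ PySem.List.pyRange (max lo (e + 1)) (hi + 1), if e < hi then hi else e) := rfl
    rw [hstep]
    set e1 : Int := if e < hi then hi else e with he1
    have he1ge : e ≤ e1 ∧ hi ≤ e1 := by rw [he1]; split <;> omega
    have hres1pw : (res ++ PySem.List.pyRange (max lo (e + 1)) (hi + 1)).Pairwise (· < ·) := by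
      rw [List.pairwise_append]
      refine ⟨h1, PySem.List.pairwise_lt_pyRange_one _ _, ?_⟩
      intro x hx y hy
      have := h2 x hx
      have := (PySem.List.mem_pyRange_one.mp hy).1
      omega
    have hres1le : ∀ x ∈ res ++ PySem.List.pyRange (max lo (e + 1)) (hi + 1), x ≤ e1 := by
      intro x hx
      rcases List.mem_append.mp hx with h' | h'
      · have := h2 x h'; omega
      · have := (PySem.List.mem_pyRange_one.mp h').2; omega
    have hrest_sorted : rest.Pairwise (fun p q => p.1 ≤ q.1) := (List.pairwise_cons.mp hsorted).2
    have hlo_le : ∀ iv' ∈ rest, lo ≤ iv'.1 := (List.pairwise_cons.mp hsorted).1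
    have hrest_le : ∀ iv' ∈ rest, iv'.1 ≤ iv'.2 := fun iv' h' => hle iv' (List.mem_cons_of_mem _ h')
    have hcov1 : ∀ iv' ∈ rest, ∀ x : Int, iv'.1 ≤ x → x ≤ e1 →
        x ∈ res ++ PySem.List.pyRange (max lo (e + 1)) (hi + 1) := by
      intro iv' h' x hx1 hx2
      rw [List.mem_append]
      by_cases hxe : x ≤ e
      · exact Or.inl (hcov iv' (List.mem_cons_of_mem _ h') x hx1 hxe)
      · right
        rw [PySem.List.mem_pyRange_one]
        have := hlo_le iv' h'
        have : x ≤ hi := by rw [he1] at hx2; split at hx2 <;> omega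
        constructor <;> omega
    obtain ⟨pw, mem⟩ := ih _ e1 hres1pw hres1le hrest_sorted hrest_le hcov1
    refine ⟨pw, ?_⟩
    intro x
    rw [mem, List.mem_append, PySem.List.mem_pyRange_one]
    constructor
    · rintro ((hx | hx) | ⟨iv', hiv', hx⟩)
      · exact Or.inl hx
      · exact Or.inr ⟨(lo, hi), by simp, by constructor <;> omega⟩
      · exact Or.inr ⟨iv', List.mem_cons_of_mem _ hiv', hx⟩
    · rintro (hx | ⟨iv', hiv', hx⟩)
      · exact Or.inl (Or.inl hx)
      · rcases List.mem_cons.mp hiv' with h' | h'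
        · subst h'
          by_cases hxe : x ≤ e
          · exact Or.inl (Or.inl (hcov (lo, hi) (by simp) x hx.1 hxe))
          · exact Or.inl (Or.inr (by constructor <;> omega))
        · exact Or.inr ⟨iv', h', hx⟩

-- the final results agree: sorted(set) = interval-merge sweep
lemma pv_final (idx : PySem.Set Int) (acc : List (Int × Int)) (h : pvInv idx acc) :
    PySem.List.sorted idx (fun x => x) =
    ((PySem.List.sorted acc (fun iv => iv.1)).foldl pvB_step ([], -1)).1 := by
  obtain ⟨hn, hm, hv⟩ := h
  have hs := PySem.List.sorted_pairwise acc (fun iv => iv.1)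
  have hmem : ∀ iv ∈ PySem.List.sorted acc (fun iv => iv.1), iv ∈ acc :=
    fun iv h' => (PySem.List.mem_sorted acc _ false iv).mp h'
  obtain ⟨pw, mem⟩ := pv_emit (PySem.List.sorted acc (fun iv => iv.1)) [] (-1)
    (by simp) (by simp) hs
    (fun iv h' => (hv iv (hmem iv h')).2)
    (by intro iv h' x hx1 hx2
        have := (hv iv (hmem iv h')).1
        omega)
  apply PySem.List.sorted_eq_of_perm_of_pairwise_lt
  · -- permutation: both nodup with the same members
    apply (List.perm_ext_iff_of_nodup ?_ hn).mpr
    · intro x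
      rw [mem, hm]
      simp only [List.not_mem_nil, false_or]
      constructor
      · rintro ⟨iv, hiv, hx⟩; exact ⟨iv, hmem iv hiv, hx⟩
      · rintro ⟨iv, hiv, hx⟩
        exact ⟨iv, (PySem.List.mem_sorted acc _ false iv).mpr hiv, hx⟩
    · exact pw.nodup.imp (fun h => h) |>.imp (fun {a b} h => by omega)
  · exact pw

-- ===== VERDICT (by name: the statement is the Claim_ definition above) =====
theorem parse_index_selection_spec : Claim_equal_parse_index_selection := by
  intro text total _
  unfold Spec_parse_index_selection parse_index_selection parse_index_selection_alt
  rcases pv_sync total ((PySem.Str.split? (PySem.Str.strip text) ",").getD []) PySem.Set.empty []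
      ⟨List.nodup_nil, by simp [PySem.Set.empty], by simp⟩ with ⟨hA, hB⟩ | ⟨idx', acc', hA, hB, hinv⟩
  · rw [hA, hB]; rfl
  · simp only [hA, hB, Option.map_some]
    exact congrArg some (pv_final idx' acc' hinv)
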